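-- pv_equiv track=rewrite | github.com/zhanghx0905/master-archive | 5500-ALGO/HW4/run.py | MG_count_feq
-- ===== SOURCE A (Python) =====
-- def MG_count_feq(nums: list[int], k: int):
--     table = {}
--     for num in nums:
--         if num in table:
--             table[num] += 1
--         elif len(table.keys()) < k - 1:
--             table[num] = 1
--         else:
--             for key in table:
--                 table[key] -= 1
--             remove = {key for key in table if table[key] == 0}
--             for key in remove:
--                 table.pop(key)
--     return table
-- ===== SOURCE B (Python) =====
-- def MG_count_feq(nums: list[int], k: int):
--     # Misra-Gries realized with scheduled evictions: each live key stores
--     # (increments, entry_time); its true count is inc - (t - entry), so it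
--     # would reach zero at "death time" inc + entry.  A death-time bucket
--     # index (with lazy invalidation of stale entries) replaces A's per-key
--     # decrement pass and zero-key scan: a decrement event just advances the
--     # global clock t and evicts exactly the keys scheduled for the new time.
--     table = {}   # key -> (inc, entry): true count = inc - (t - entry)
--     die = {}     # death time -> keys possibly dying then (may be stale)
--     t = 0
--     for num in nums:
--         if num in table:
--             inc, e = table[num]
--             table[num] = (inc + 1, e)
--             d = inc + 1 + e
--             die.setdefault(d, []).append(num)
--         elif len(table) < k - 1:
--             table[num] = (1, t)
--             d = 1 + t
--             die.setdefault(d, []).append(num)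
--         else:
--             t += 1
--             for key in die.pop(t, []):
--                 rec = table.get(key)
--                 if rec is not None and rec[0] + rec[1] == t:
--                     del table[key]
--     return {key: inc - (t - e) for key, (inc, e) in table.items()}
-- ===== Notes on version B (the rewrite author's own statement) =====
-- stated objective: alternative
-- what changed: B never decrements or scans counters: each live key stores (increments, entry time) so its count is implicit against a global clock, and a death-time bucket index with lazy invalidation evicts exactly the keys reaching zero, replacing A's per-event decrement pass, zero-scan and removal set by O(1) amortized bucket operations.
import Mathlib
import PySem

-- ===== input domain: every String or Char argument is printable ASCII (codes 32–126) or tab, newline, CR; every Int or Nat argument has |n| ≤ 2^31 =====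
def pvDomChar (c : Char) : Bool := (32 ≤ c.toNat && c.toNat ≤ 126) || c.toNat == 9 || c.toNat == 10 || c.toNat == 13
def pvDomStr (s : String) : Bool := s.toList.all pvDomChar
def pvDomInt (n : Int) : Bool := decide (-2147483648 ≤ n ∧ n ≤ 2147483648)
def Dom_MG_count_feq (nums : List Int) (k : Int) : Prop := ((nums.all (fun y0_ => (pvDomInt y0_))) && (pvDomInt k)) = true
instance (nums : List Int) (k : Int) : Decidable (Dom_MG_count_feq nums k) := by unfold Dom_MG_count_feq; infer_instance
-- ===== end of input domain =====

-- B replaces A's per-key decrement pass and zero-key scan by scheduled evictions: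
-- each live key stores (increments, entry time) and a death-time bucket index with
-- lazy invalidation evicts exactly the keys reaching count zero (objective: alternative).

-- ===== PORT A =====
-- one iteration of A's loop body
def mgStepA (k : Int) (table : PySem.Dict Int Int) (num : Int) : PySem.Dict Int Int :=
  if table.contains num then
    -- table[num] += 1
    table.insert num (table.getD num 0 + 1)
  else if (table.keys.length : Int) < k - 1 then
    -- table[num] = 1
    table.insert num 1
  else
    -- for key in table: table[key] -= 1
    let dec := table.keys.foldl (fun t key => t.insert key (t.getD key 0 - 1)) table
    -- remove = {key for key in table if table[key] == 0}
    let remove := PySem.Set.ofList (dec.keys.filter (fun key => dec.getD key 0 == 0))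
    -- for key in remove: table.pop(key)
    remove.foldl (fun t key => t.erase key) dec

def MG_count_feq (nums : List Int) (k : Int) : List (Int × Int) :=
  (nums.foldl (mgStepA k) PySem.Dict.empty).items

-- ===== PORT B =====
-- one iteration of B's loop body; state = (table : key -> (inc, entry), die : death time -> keys, t)
def mgStepB (k : Int) (s : PySem.Dict Int (Int × Int) × PySem.Dict Int (List Int) × Int)
    (num : Int) : PySem.Dict Int (Int × Int) × PySem.Dict Int (List Int) × Int :=
  let table := s.1
  let die := s.2.1
  let t := s.2.2
  if table.contains num then
    -- inc, e = table[num]; table[num] = (inc + 1, e); d = inc + 1 + e; die[d] = die.get(d, []) + [num]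
    let r := table.getD num (0, 0)
    let d := r.1 + 1 + r.2
    (table.insert num (r.1 + 1, r.2), die.insert d (die.getD d [] ++ [num]), t)
  else if (table.keys.length : Int) < k - 1 then
    -- table[num] = (1, t); d = 1 + t; die[d] = die.get(d, []) + [num]
    let d := 1 + t
    (table.insert num (1, t), die.insert d (die.getD d [] ++ [num]), t)
  else
    -- t += 1; for key in die.pop(t, []): rec = table.get(key); if rec is not None and rec[0]+rec[1]==t: del table[key]
    let t' := t + 1
    let tb' := (die.getD t' []).foldl (fun tb key =>
      match tb.get? key with
      | some r => if r.1 + r.2 == t' then tb.erase key else tb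
      | none => tb) table
    (tb', die.erase t', t')

def MG_count_feq_alt (nums : List Int) (k : Int) : List (Int × Int) :=
  let st := nums.foldl (mgStepB k) (PySem.Dict.empty, PySem.Dict.empty, 0)
  st.1.items.map (fun p => (p.1, p.2.1 - (st.2.2 - p.2.2)))

-- ===== PRECONDITION & SPEC =====
def Spec_MG_count_feq (nums : List Int) (k : Int) (out : List (Int × Int)) : Prop := out = MG_count_feq_alt nums k
instance (nums : List Int) (k : Int) (out : List (Int × Int)) : Decidable (Spec_MG_count_feq nums k out) := by unfold Spec_MG_count_feq; infer_instance

-- ===== CLAIM (what is proved, stated in full; the proofs are below) =====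
def Claim_equal_MG_count_feq : Prop := ∀ (nums : List Int) (k : Int), Dom_MG_count_feq nums k → Spec_MG_count_feq nums k (MG_count_feq nums k)

-- ===== LEMMAS AND PROOFS =====

-- B's record (inc, e) at clock t denotes the true count inc - (t - e)
def mgShift (t : Int) (p : Int × (Int × Int)) : Int × Int := (p.1, p.2.1 - (t - p.2.2))

-- the loop invariant: shifting B's table gives A's table entry for entry, A's keys are
-- distinct, A's counts are ≥ 1, and every live key is scheduled in its death-time bucket
def MGInv (tA : PySem.Dict Int Int) (tB : PySem.Dict Int (Int × Int))
    (die : PySem.Dict Int (List Int)) (t : Int) : Prop :=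
  tB.items.map (mgShift t) = tA.items ∧
  tA.keys.Nodup ∧ (∀ p ∈ tA.items, 1 ≤ p.2) ∧
  (∀ p ∈ tB.items, p.1 ∈ die.getD (p.2.1 + p.2.2) [])

theorem keys_rel (tA : PySem.Dict Int Int) (tB : PySem.Dict Int (Int × Int)) (t : Int)
    (h1 : tB.items.map (mgShift t) = tA.items) : tB.keys = tA.keys := by
  simp only [PySem.Dict.keys, ← h1, List.map_map]
  rfl

theorem contains_rel (tA : PySem.Dict Int Int) (tB : PySem.Dict Int (Int × Int)) (t x : Int)
    (h1 : tB.items.map (mgShift t) = tA.items) : tA.contains x = tB.contains x := by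
  simp only [PySem.Dict.contains, ← h1, List.any_map]
  rfl

theorem get?_rel (tA : PySem.Dict Int Int) (tB : PySem.Dict Int (Int × Int)) (t x : Int)
    (h1 : tB.items.map (mgShift t) = tA.items) :
    tA.get? x = (tB.get? x).map (fun r => r.1 - (t - r.2)) := by
  simp only [PySem.Dict.get?, ← h1, List.find?_map]
  have : ((fun p : Int × Int => p.1 == x) ∘ mgShift t) =
      (fun p : Int × (Int × Int) => p.1 == x) := rfl
  rw [this]
  cases tB.items.find? (fun p => p.1 == x) <;> rfl

-- ===== A-side loop characterisations (decrement pass, removal set) =====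

theorem dec_fold_items (ks : List Int) (d : PySem.Dict Int Int)
    (hnd : d.keys.Nodup) (hks : ks.Nodup) (hsub : ∀ x ∈ ks, x ∈ d.keys) :
    (ks.foldl (fun t key => t.insert key (t.getD key 0 - 1)) d).items =
      d.items.map (fun p => if p.1 ∈ ks then (p.1, p.2 - 1) else p) := by
  induction ks generalizing d with
  | nil => simp
  | cons a ks ih =>
      have hmem : a ∈ d.keys := hsub a (List.mem_cons_self)
      have hcont : d.contains a = true :=
        (PySem.Dict.contains_iff_mem_keys _ _).2 hmem
      have hitems : (d.insert a (d.getD a 0 - 1)).items =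
          d.items.map (fun p => if p.1 == a then (a, d.getD a 0 - 1) else p) :=
        PySem.Dict.items_insert_of_contains _ _ hcont
      have hkeys : (d.insert a (d.getD a 0 - 1)).keys = d.keys :=
        PySem.Dict.keys_insert_of_contains _ _ hcont
      simp only [List.foldl_cons]
      rw [ih _ (by rw [hkeys]; exact hnd) hks.of_cons
        (by intro x hx; rw [hkeys]; exact hsub x (List.mem_cons_of_mem _ hx))]
      rw [hitems, List.map_map]
      refine List.map_congr_left ?_
      intro p hp
      have hnota : a ∉ ks := (List.nodup_cons.1 hks).1
      by_cases hpa : p.1 = a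
      · have : d.getD a 0 = p.2 := by
          rw [← hpa]; exact PySem.Dict.getD_of_mem_items _ hp hnd 0
        simp [Function.comp, hpa, this, hnota]
      · simp [Function.comp, hpa, beq_iff_eq]

theorem dec_items (d : PySem.Dict Int Int) (hnd : d.keys.Nodup) :
    (d.keys.foldl (fun t key => t.insert key (t.getD key 0 - 1)) d).items =
      d.items.map (fun p => (p.1, p.2 - 1)) := by
  rw [dec_fold_items d.keys d hnd hnd (fun x hx => hx)]
  refine List.map_congr_left ?_
  intro p hp
  have : p.1 ∈ d.keys := PySem.Dict.mem_keys_of_mem_items _ hp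
  simp [this]

theorem erase_fold_items (ks : List Int) (d : PySem.Dict Int Int) :
    (ks.foldl (fun t key => t.erase key) d).items =
      d.items.filter (fun p => !(decide (p.1 ∈ ks))) := by
  induction ks generalizing d with
  | nil => simp
  | cons a ks ih =>
      simp only [List.foldl_cons]
      rw [ih]
      show ((d.items.filter (fun p => !(p.1 == a))).filter (fun p => !(decide (p.1 ∈ ks)))) = _
      rw [List.filter_filter]
      refine List.filter_congr ?_
      intro p _
      by_cases h : p.1 = a <;> by_cases h2 : p.1 ∈ ks <;> simp [h, h2]

-- A's whole else-branch: decrement every count, drop the zeros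
theorem stepA_else_items (tA : PySem.Dict Int Int) (hnd : tA.keys.Nodup) :
    (let dec := tA.keys.foldl (fun t key => t.insert key (t.getD key 0 - 1)) tA
     let remove := PySem.Set.ofList (dec.keys.filter (fun key => dec.getD key 0 == 0))
     remove.foldl (fun t key => t.erase key) dec).items =
      (tA.items.filter (fun p => !(p.2 - 1 == 0))).map (fun p => (p.1, p.2 - 1)) := by
  have hdec := dec_items tA hnd
  set dec := tA.keys.foldl (fun t key => t.insert key (t.getD key 0 - 1)) tA with hdecdef
  have hdkeys : dec.keys = tA.keys := by
    simp only [PySem.Dict.keys, hdec, List.map_map]; rfl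
  have hdnd : dec.keys.Nodup := by rw [hdkeys]; exact hnd
  rw [erase_fold_items]
  rw [hdec, List.filter_map]
  congr 1
  refine List.filter_congr ?_
  intro p hp
  have hmem : ((p.1, p.2 - 1) ∈ dec.items) := by rw [hdec]; exact List.mem_map_of_mem hp
  have hgd : dec.getD p.1 0 = p.2 - 1 := PySem.Dict.getD_of_mem_items _ hmem hdnd 0
  have hk1 : p.1 ∈ dec.keys := PySem.Dict.mem_keys_of_mem_items dec (p := (p.1, p.2 - 1)) hmem
  show (!(decide ((p.1, p.2 - 1).1 ∈ PySem.Set.ofList (dec.keys.filter (fun key => dec.getD key 0 == 0))))) = (!(p.2 - 1 == 0))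
  simp only [PySem.Set.mem_ofList, List.mem_filter]
  simp only [hgd, hk1, true_and]
  by_cases hz : p.2 - 1 = 0
  · simp [hz]
  · simp [hz, beq_iff_eq]

-- ===== B-side loop characterisation (the eviction pass) =====

-- the lazy-checked deletion loop over a bucket erases exactly the listed keys whose
-- current death time is t'
theorem nodup_keys_of_items {nu : Type} (d : PySem.Dict Int nu) (l : List (Int × nu))
    (h : d.items = l) (h2 : (l.map Prod.fst).Nodup) : d.keys.Nodup := by
  simp only [PySem.Dict.keys, h]
  exact h2

theorem evict_fold_items (t' : Int) (ks : List Int) (tb : PySem.Dict Int (Int × Int))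
    (hnd : tb.keys.Nodup) :
    (ks.foldl (fun tb key =>
        match tb.get? key with
        | some r => if r.1 + r.2 == t' then tb.erase key else tb
        | none => tb) tb).items =
      tb.items.filter (fun p => !(decide (p.1 ∈ ks) && (p.2.1 + p.2.2 == t'))) := by
  induction ks generalizing tb with
  | nil => simp
  | cons a ks ih =>
      simp only [List.foldl_cons]
      cases hga : tb.get? a with
      | none =>
          simp only [hga]
          rw [ih tb hnd]
          refine List.filter_congr ?_
          intro p hp
          have hne : p.1 ≠ a := by
            intro he
            have : tb.get? p.1 = some p.2 := PySem.Dict.get?_of_mem_items _ hp hnd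
            rw [he, hga] at this; cases this
          simp [List.mem_cons, hne]
      | some r =>
          by_cases hd : r.1 + r.2 = t'
          · have hsimp : (match some r with
                | some r => if r.1 + r.2 == t' then tb.erase a else tb
                | none => tb) = tb.erase a := by simp [hd]
            simp only [hsimp]
            have hkeyse : (tb.erase a).keys.Nodup := by
              have : (tb.erase a).items = tb.items.filter (fun p => !(p.1 == a)) := rfl
              simp only [PySem.Dict.keys, this]
              exact hnd.sublist (List.Sublist.map Prod.fst List.filter_sublist)
            rw [ih _ hkeyse]
            show ((tb.items.filter (fun p => !(p.1 == a))).filter _) = _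
            rw [List.filter_filter]
            refine List.filter_congr ?_
            intro p hp
            by_cases hpa : p.1 = a
            · have hpr : p.2 = r := by
                have : tb.get? p.1 = some p.2 := PySem.Dict.get?_of_mem_items _ hp hnd
                rw [hpa, hga] at this; exact (Option.some.inj this).symm
              simp [hpa, hpr, hd, List.mem_cons]
            · simp [hpa, List.mem_cons]
          · have hsimp : (match some r with
                | some r => if r.1 + r.2 == t' then tb.erase a else tb
                | none => tb) = tb := by simp [hd]
            simp only [hsimp]
            rw [ih tb hnd]
            refine List.filter_congr ?_
            intro p hp
            by_cases hpa : p.1 = a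
            · have hpr : p.2 = r := by
                have : tb.get? p.1 = some p.2 := PySem.Dict.get?_of_mem_items _ hp hnd
                rw [hpa, hga] at this; exact (Option.some.inj this).symm
              simp [hpa, hpr, hd, List.mem_cons]
            · simp [hpa, List.mem_cons]

-- erasing one bucket does not change the others
theorem find?_filter_ne (l : List (Int × List Int)) (a b : Int) (h : b ≠ a) :
    (l.filter (fun p => !(p.1 == a))).find? (fun p => p.1 == b) = l.find? (fun p => p.1 == b) := by
  induction l with
  | nil => rfl
  | cons q l ih =>
      by_cases hqa : q.1 = a
      · have ha : (q.1 == a) = true := by simp [hqa]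
        have hb : (q.1 == b) = false := by
          rw [hqa]; exact beq_eq_false_iff_ne.2 (fun he => h he.symm)
        simp [ha, hb, List.find?_cons, ih]
      · have ha : (q.1 == a) = false := by simp [hqa]
        by_cases hqb : q.1 = b
        · have hb : (q.1 == b) = true := by simp [hqb]
          simp [ha, hb]
        · have hb : (q.1 == b) = false := by simp [hqb]
          simp [ha, hb, List.find?_cons, ih]

theorem getD_erase_of_ne (die : PySem.Dict Int (List Int)) (a b : Int) (h : b ≠ a) :
    (die.erase a).getD b [] = die.getD b [] := by
  have hitems : (die.erase a).items = die.items.filter (fun p => !(p.1 == a)) := rfl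
  simp only [PySem.Dict.getD, PySem.Dict.get?, hitems]
  rw [find?_filter_ne die.items a b h]

-- ===== the step preserves the invariant =====

theorem mg_step_inv (k num t : Int) (tA : PySem.Dict Int Int)
    (tB : PySem.Dict Int (Int × Int)) (die : PySem.Dict Int (List Int))
    (h : MGInv tA tB die t) :
    MGInv (mgStepA k tA num) (mgStepB k (tB, die, t) num).1
      (mgStepB k (tB, die, t) num).2.1 (mgStepB k (tB, die, t) num).2.2 := by
  obtain ⟨h1, hnd, hge, hdie⟩ := h
  have hcont := contains_rel tA tB t num h1
  have hkeys := keys_rel tA tB t h1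
  have hndB : tB.keys.Nodup := by rw [hkeys]; exact hnd
  unfold mgStepA mgStepB
  by_cases hc : tB.contains num = true
  · -- increment branch
    have hcA : tA.contains num = true := by rw [hcont]; exact hc
    simp only [hcA, hc, if_true]
    obtain ⟨r, hr⟩ : ∃ r, tB.get? num = some r := by
      have := PySem.Dict.contains_eq_isSome_get? tB num
      rw [hc] at this
      exact Option.isSome_iff_exists.1 this.symm
    have hrmem : (num, r) ∈ tB.items := PySem.Dict.mem_items_of_get?_eq_some tB hr
    have hgA : tA.getD num 0 = r.1 - (t - r.2) := by
      simp [PySem.Dict.getD, get?_rel tA tB t num h1, hr]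
    have hgB : tB.getD num (0, 0) = r := by simp [PySem.Dict.getD, hr]
    have hcArec : (num, r.1 - (t - r.2)) ∈ tA.items := by
      rw [← h1]
      exact List.mem_map_of_mem hrmem
    have hge1 : 1 ≤ r.1 - (t - r.2) := hge _ hcArec
    refine ⟨?_, ?_, ?_, ?_⟩
    · rw [PySem.Dict.items_insert_of_contains _ _ hc,
        PySem.Dict.items_insert_of_contains _ _ hcA, ← h1, List.map_map, List.map_map]
      refine List.map_congr_left ?_
      intro p hp
      by_cases hpa : p.1 = num
      · have hpr : p.2 = r := by
          have : tB.get? p.1 = some p.2 := PySem.Dict.get?_of_mem_items _ hp hndB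
          rw [hpa, hr] at this; exact (Option.some.inj this).symm
        simp only [Function.comp, hgB, mgShift, hpa, hpr, beq_self_eq_true, if_true, hgA]
        have : r.1 + 1 - (t - r.2) = r.1 - (t - r.2) + 1 := by ring
        rw [this]
      · simp [Function.comp, mgShift, hpa]
    · rw [PySem.Dict.keys_insert_of_contains _ _ hcA]; exact hnd
    · intro p hp
      rw [PySem.Dict.items_insert_of_contains _ _ hcA] at hp
      obtain ⟨q, hq, hqe⟩ := List.mem_map.1 hp
      by_cases hqa : q.1 = num
      · have : p = (num, tA.getD num 0 + 1) := by rw [← hqe]; simp [hqa]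
        rw [this, hgA]
        simp only
        omega
      · have : p = q := by rw [← hqe]; simp [hqa]
        rw [this]; exact hge q hq
    · intro p hp
      rw [PySem.Dict.items_insert_of_contains _ _ hc] at hp
      obtain ⟨q, hq, hqe⟩ := List.mem_map.1 hp
      by_cases hqa : q.1 = num
      · have hp' : p = (num, (tB.getD num (0,0)).1 + 1, (tB.getD num (0,0)).2) := by
          rw [← hqe]; simp [hqa]
        rw [hp', hgB]
        simp only [PySem.Dict.getD_insert]
        exact List.mem_append_right _ (List.mem_singleton.2 rfl)
      · have hp' : p = q := by rw [← hqe]; simp [hqa]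
        rw [hp']
        have hq' := hdie q hq
        rw [hgB]
        rw [PySem.Dict.getD_insert]
        split_ifs with hsame
        · rw [hsame] at hq'
          exact List.mem_append_left _ hq'
        · exact hq'
  · by_cases hlen : ((tB.keys.length : Int) < k - 1)
    · -- fresh-insert branch
      have hcA : tA.contains num = false := by rw [hcont]; simpa using hc
      have hlenA : ((tA.keys.length : Int) < k - 1) := by rw [← hkeys]; exact hlen
      simp only [hcA, hc, hlen, hlenA, if_true, if_false, Bool.false_eq_true]
      have hnm : ¬ num ∈ tA.keys := by
        intro hmem
        have := (PySem.Dict.contains_iff_mem_keys tA num).2 hmem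
        rw [hcA] at this; cases this
      refine ⟨?_, ?_, ?_, ?_⟩
      · rw [PySem.Dict.items_insert_of_not_contains _ _ (by simpa using hc),
          PySem.Dict.items_insert_of_not_contains _ _ hcA, ← h1, List.map_append]
        simp [mgShift]
      · rw [PySem.Dict.keys_insert_of_not_contains _ _ hcA]
        refine List.Nodup.append hnd (List.nodup_singleton _) ?_
        intro x hx hx2
        have : x = num := by simpa using hx2
        subst this
        exact hnm hx
      · intro p hp
        rw [PySem.Dict.items_insert_of_not_contains _ _ hcA] at hp
        rcases List.mem_append.1 hp with hp | hp
        · exact hge p hp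
        · have : p = (num, 1) := by simpa using hp
          rw [this]
      · intro p hp
        rw [PySem.Dict.items_insert_of_not_contains _ _ (by simpa using hc)] at hp
        rcases List.mem_append.1 hp with hp | hp
        · have hq' := hdie p hp
          rw [PySem.Dict.getD_insert]
          split_ifs with hsame
          · rw [hsame] at hq'
            exact List.mem_append_left _ hq'
          · exact hq'
        · have : p = (num, 1, t) := by simpa using hp
          rw [this]
          rw [PySem.Dict.getD_insert, if_pos rfl]
          exact List.mem_append_right _ (List.mem_singleton.2 rfl)
    · -- eviction branch
      have hcA : tA.contains num = false := by rw [hcont]; simpa using hc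
      have hlenA : ¬ ((tA.keys.length : Int) < k - 1) := by rw [← hkeys]; exact hlen
      simp only [hcA, hc, hlen, hlenA, if_false, Bool.false_eq_true]
      have hAitems := stepA_else_items tA hnd
      simp only at hAitems
      have hBitems := evict_fold_items (t + 1) (die.getD (t + 1) []) tB hndB
      -- on tB.items the bucket test is equivalent to "death time = t + 1"
      have hBitems' :
          ((die.getD (t + 1) []).foldl (fun tb key =>
              match tb.get? key with
              | some r => if r.1 + r.2 == t + 1 then tb.erase key else tb
              | none => tb) tB).items =
            tB.items.filter (fun p => !(p.2.1 + p.2.2 == t + 1)) := by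
        rw [hBitems]
        refine List.filter_congr ?_
        intro p hp
        by_cases hd : p.2.1 + p.2.2 = t + 1
        · have : p.1 ∈ die.getD (t + 1) [] := by
            have := hdie p hp
            rwa [hd] at this
          simp [this, hd]
        · simp [hd]
      have hBnd' : (tB.items.filter (fun p => !(p.2.1 + p.2.2 == t + 1))).map (mgShift (t + 1)) =
          (tA.items.filter (fun p => !(p.2 - 1 == 0))).map (fun p => (p.1, p.2 - 1)) := by
        rw [← h1, List.filter_map, List.map_map]
        have hpred : ((fun p : Int × Int => !(p.2 - 1 == 0)) ∘ mgShift t) =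
            (fun p : Int × (Int × Int) => !(p.2.1 + p.2.2 == t + 1)) := by
          funext p
          show (!(p.2.1 - (t - p.2.2) - 1 == 0)) = (!(p.2.1 + p.2.2 == t + 1))
          have : (p.2.1 - (t - p.2.2) - 1 == 0) = (p.2.1 + p.2.2 == t + 1) := by
            rw [Bool.eq_iff_iff]; simp only [beq_iff_eq]; omega
          rw [this]
        have hfun : ((fun p : Int × Int => (p.1, p.2 - 1)) ∘ mgShift t) = mgShift (t + 1) := by
          funext p
          show (p.1, p.2.1 - (t - p.2.2) - 1) = (p.1, p.2.1 - (t + 1 - p.2.2))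
          have : p.2.1 - (t - p.2.2) - 1 = p.2.1 - (t + 1 - p.2.2) := by ring
          rw [this]
        rw [hpred, hfun]
      refine ⟨?_, ?_, ?_, ?_⟩
      · rw [hBitems', hAitems, hBnd']
      · refine nodup_keys_of_items _ _ hAitems ?_
        rw [List.map_map]
        have : ((Prod.fst : Int × Int → Int) ∘ (fun p : Int × Int => (p.1, p.2 - 1))) = Prod.fst := rfl
        rw [this]
        exact hnd.sublist (List.Sublist.map Prod.fst List.filter_sublist)
      · intro p hp
        rw [hAitems] at hp
        obtain ⟨q, hq, hqe⟩ := List.mem_map.1 hp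
        have hq' := List.mem_filter.1 hq
        have h2 := hge q hq'.1
        have h3 : ¬ (q.2 - 1 = 0) := by simpa using hq'.2
        have : p.2 = q.2 - 1 := by rw [← hqe]
        omega
      · intro p hp
        rw [hBitems'] at hp
        have hp' := List.mem_filter.1 hp
        have hne : p.2.1 + p.2.2 ≠ t + 1 := by simpa using hp'.2
        rw [getD_erase_of_ne die (t + 1) _ hne]
        exact hdie p hp'.1

theorem mg_loop_inv (k : Int) (nums : List Int) (tA : PySem.Dict Int Int)
    (tB : PySem.Dict Int (Int × Int)) (die : PySem.Dict Int (List Int)) (t : Int)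
    (h : MGInv tA tB die t) :
    MGInv (nums.foldl (mgStepA k) tA)
      (nums.foldl (mgStepB k) (tB, die, t)).1
      (nums.foldl (mgStepB k) (tB, die, t)).2.1
      (nums.foldl (mgStepB k) (tB, die, t)).2.2 := by
  induction nums generalizing tA tB die t with
  | nil => exact h
  | cons x xs ih =>
    simpa using ih _ _ _ _ (mg_step_inv k x t tA tB die h)

-- ===== VERDICT (by name: the statement is the Claim_ definition above) =====
theorem MG_count_feq_spec : Claim_equal_MG_count_feq := by
  intro nums k _
  unfold Spec_MG_count_feq MG_count_feq MG_count_feq_alt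
  have h := mg_loop_inv k nums PySem.Dict.empty PySem.Dict.empty PySem.Dict.empty 0 (by
    refine ⟨rfl, ?_, ?_, ?_⟩ <;> simp [PySem.Dict.empty, PySem.Dict.keys])
  obtain ⟨h1, _, _, _⟩ := h
  exact h1.symm
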